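-- pv_equiv track=rewrite | github.com/maksymstets/Peptide-predictor | Peptide predictor/pattern.py | argc_proteinase_logic
-- ===== SOURCE A (Python) =====
-- def argc_proteinase_logic(content):
--     #This function splits the sequence according to the cleavage site. Mimics Arg-C proteinase behaviour.
--     cleavage_sites = []
--     for site in range(len(content) - 1):
--         cleavage = False
--         P1 = content[site]
--         if P1 == 'R':
--             cleavage = True
--         if cleavage:
--             cleavage_sites.append(site + 1)
--     return cleavage_sites
-- ===== SOURCE B (Python) =====
-- def argc_proteinase_logic(content):
--     # Search-and-jump: repeatedly str.find the next 'R' instead of scanning every index.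
--     cleavage_sites = []
--     start = 0
--     while True:
--         idx = content.find('R', start)
--         if idx == -1:
--             break
--         if idx < len(content) - 1:
--             cleavage_sites.append(idx + 1)
--         start = idx + 1
--     return cleavage_sites
-- ===== Notes on version B (the rewrite author's own statement) =====
-- stated objective: faster
-- what changed: Replaces the per-index scan-and-branch loop with a search-and-jump loop using str.find to hop directly between 'R' occurrences.
import Mathlib
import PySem

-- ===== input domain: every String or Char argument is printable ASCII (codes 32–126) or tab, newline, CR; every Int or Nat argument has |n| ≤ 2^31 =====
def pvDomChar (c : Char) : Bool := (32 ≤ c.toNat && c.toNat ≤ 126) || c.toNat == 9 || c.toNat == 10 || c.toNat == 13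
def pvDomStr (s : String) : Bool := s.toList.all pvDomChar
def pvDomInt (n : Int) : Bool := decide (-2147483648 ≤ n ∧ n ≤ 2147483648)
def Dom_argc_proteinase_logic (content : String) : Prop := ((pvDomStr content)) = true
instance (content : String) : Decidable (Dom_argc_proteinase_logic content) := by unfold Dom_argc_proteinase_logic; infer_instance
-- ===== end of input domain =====

-- B replaces A's per-index scan-and-branch loop with a search-and-jump loop over str.find.

-- ===== PORT A =====
def argc_proteinase_logic (content : String) : List Int :=
  (PySem.List.pyRange 0 (PySem.Str.len content - 1) 1).foldl
    (fun cleavage_sites site =>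
      let cleavage := false
      let P1 := PySem.Str.pyGet? content site
      let cleavage := if P1 = some 'R' then true else cleavage
      if cleavage then cleavage_sites ++ [site + 1] else cleavage_sites) []

-- ===== PORT B =====
-- fuel is a totality guard only: content.length + 1 steps always suffice,
-- since each iteration moves `start` strictly forward.
def argcAltLoop (content : String) (fuel : Nat) (start : Nat) : List Int :=
  match fuel with
  | 0 => []
  | fuel + 1 =>
    let idx := PySem.Str.findFrom content "R" (start : Int) none
    if idx = -1 then []
    else
      (if idx < PySem.Str.len content - 1 then [idx + 1] else []) ++
        argcAltLoop content fuel (idx.toNat + 1)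

def argc_proteinase_logic_alt (content : String) : List Int :=
  argcAltLoop content (content.length + 1) 0

-- ===== PRECONDITION & SPEC =====
def Spec_argc_proteinase_logic (content : String) (out : List Int) : Prop := out = argc_proteinase_logic_alt content
instance (content : String) (out : List Int) : Decidable (Spec_argc_proteinase_logic content out) := by unfold Spec_argc_proteinase_logic; infer_instance

-- ===== CLAIM (what is proved, stated in full; the proofs are below) =====
def Claim_equal_argc_proteinase_logic : Prop := ∀ (content : String), Dom_argc_proteinase_logic content → Spec_argc_proteinase_logic content (argc_proteinase_logic content)

-- ===== LEMMAS AND PROOFS =====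

-- common middle form: positions i+1 for every 'R' at an index i in [k, len-1)
def argcSpecFrom (cs : List Char) (k : Nat) : List Int :=
  ((List.range' k (cs.length - 1 - k)).filter (fun i => cs[i]? = some 'R')).map
    (fun i => (i : Int) + 1)

theorem singleton_prefix_iff (a : Char) (l : List Char) :
    [a] <+: l ↔ l[0]? = some a := by
  cases l with
  | nil => simp
  | cons b t => simp [List.cons_prefix_iff]

theorem singleton_infix_iff (a : Char) (l : List Char) :
    [a] <:+: l ↔ a ∈ l := by
  constructor
  · intro h; exact h.subset (by simp)
  · intro h
    obtain ⟨s, t, rfl⟩ := List.append_of_mem h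
    exact ⟨s, t, by simp⟩

theorem specFrom_nil_of_noR (cs : List Char) (k m : Nat)
    (_hm : m ≤ cs.length - 1 - k)
    (hno : ∀ i, i < m → cs[k + i]? ≠ some 'R') :
    ((List.range' k m).filter (fun i => cs[i]? = some 'R')) = [] := by
  apply List.filter_eq_nil_iff.mpr
  intro i hi
  have hki : k ≤ i ∧ i < k + m := List.mem_range'_1.mp hi
  have := hno (i - k) (by omega)
  have hik : k + (i - k) = i := by omega
  rw [hik] at this
  simpa using this

theorem argcLoop_eq (content : String) (fuel k : Nat)
    (hk : k ≤ content.toList.length) (hfuel : content.toList.length - k < fuel) :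
    argcAltLoop content fuel k = argcSpecFrom content.toList k := by
  induction fuel generalizing k with
  | zero => omega
  | succ fuel ih =>
    set cs := content.toList with hcs
    unfold argcAltLoop
    simp only [PySem.Str.findFrom_eq]
    rw [PySem.Chars.findFrom_natCast _ _ k hk]
    have hRl : ("R" : String).toList = ['R'] := rfl
    by_cases h : PySem.Chars.find (cs.drop k) "R".toList = -1
    · -- no further 'R': both sides empty
      rw [if_pos (by rw [if_pos h])]
      have hno : ¬ (['R'] <:+: cs.drop k) := by
        have := (PySem.Chars.find_eq_neg_one_iff (cs.drop k) "R".toList).mp h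
        rwa [hRl] at this
      have hmem : ∀ i, i < cs.length - 1 - k → cs[k + i]? ≠ some 'R' := by
        intro i _ hR
        apply hno
        rw [singleton_infix_iff]
        refine List.mem_of_getElem? (i := i) ?_
        rw [List.getElem?_drop]; exact hR
      unfold argcSpecFrom
      rw [specFrom_nil_of_noR cs k _ le_rfl hmem]
      rfl
    · -- found at absolute index k + j
      have h0 : (0:Int) ≤ PySem.Chars.find (cs.drop k) "R".toList := by
        have := PySem.Chars.neg_one_le_find (cs.drop k) "R".toList
        omega
      have hspec := PySem.Chars.find_spec h0
      set j' := PySem.Chars.find (cs.drop k) "R".toList with hj'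
      set j := j'.toNat with hjdef
      have hjj : j' = (j : Int) := (Int.toNat_of_nonneg h0).symm
      rw [if_neg h, if_neg (by omega)]
      have hpre := hspec.1
      rw [hRl, singleton_prefix_iff, List.getElem?_drop, List.getElem?_drop] at hpre
      have hRat : cs[k + j]? = some 'R' := by simpa using hpre
      have hjlt : k + j < cs.length := by
        obtain ⟨hlt, -⟩ := List.getElem?_eq_some_iff.mp hRat
        exact hlt
      have hnonR : ∀ i, i < j → cs[k + i]? ≠ some 'R' := by
        intro i hij hR
        have hni := hspec.2 i (by omega)
        rw [hRl, singleton_prefix_iff, List.getElem?_drop, List.getElem?_drop] at hni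
        exact hni (by simpa using hR)
      have hfin : argcAltLoop content fuel ((↑k + j').toNat + 1) = argcSpecFrom cs (k + j + 1) := by
        have : (↑k + j').toNat + 1 = k + j + 1 := by omega
        rw [this]
        exact ih (k + j + 1) (by omega) (by omega)
      rw [hfin]
      have hlen : cs.length = content.length := by simp [hcs]
      by_cases hlast : k + j + 1 = cs.length
      · -- 'R' at the final index: contributes nothing, and nothing follows
        rw [if_neg (by simp only [hjj]; simp; omega)]
        unfold argcSpecFrom
        rw [specFrom_nil_of_noR cs k _ le_rfl (by intro i hi; exact hnonR i (by omega)),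
            specFrom_nil_of_noR cs (k + j + 1) _ le_rfl (by intro i hi; exact absurd hi (by omega))]
        simp
      · rw [if_pos (by simp only [hjj]; simp; omega)]
        have hsplit : argcSpecFrom cs k = ((k : Int) + j + 1) :: argcSpecFrom cs (k + j + 1) := by
          unfold argcSpecFrom
          have hm1 : cs.length - 1 - k = j + (cs.length - 1 - k - j) := by omega
          rw [hm1, ← List.range'_append_1]
          have hm2 : cs.length - 1 - k - j = (cs.length - 1 - (k + j + 1)) + 1 := by omega
          rw [hm2, List.range'_succ, List.filter_append,
              specFrom_nil_of_noR cs k j (by omega) hnonR]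
          simp [hRat]
        rw [hsplit]
        simp [hjj]

theorem argcA_eq (content : String) :
    argc_proteinase_logic content = argcSpecFrom content.toList 0 := by
  unfold argc_proteinase_logic argcSpecFrom
  simp only [PySem.List.pyRange_one, PySem.List.foldl_append_if]
  simp [List.filter_map, List.range_eq_range', Function.comp_def]
  generalize (List.filter (fun x => decide (content.toList[x]? = some 'R')) (List.range' 0 (content.length - 1))) = t
  induction t with
  | nil => rfl
  | cons a t ih => simpa using ih

-- ===== VERDICT (by name: the statement is the Claim_ definition above) =====
theorem argc_proteinase_logic_spec : Claim_equal_argc_proteinase_logic := by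
  intro content _
  unfold Spec_argc_proteinase_logic argc_proteinase_logic_alt
  rw [argcA_eq, argcLoop_eq content _ 0 (by omega) (by rw [String.length_toList]; omega)]
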